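-- pv_equiv track=rewrite | github.com/Stefanodmm/Trader-Signs | pantalla/pestaña.py | determinar_recomendacion_general
-- ===== SOURCE A (Python) =====
-- def determinar_recomendacion_general(recomendaciones):
--     """Determina la recomendación general basada en las recomendaciones individuales."""
--     if recomendaciones:
--         if all(r == "Comprar" for r in recomendaciones):
--             return "Comprar"
--         elif all(r == "Vender" for r in recomendaciones):
--             return "Vender"
--         else:
--             return "Mantener"
--     return "Sin recomendaciones"
-- ===== SOURCE B (Python) =====
-- def determinar_recomendacion_general(recomendaciones):
--     """Determina la recomendación general basada en las recomendaciones individuales."""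
--     if not recomendaciones:
--         return "Sin recomendaciones"
--     # Single pass: fix a consensus candidate from the first element, then
--     # bail out to "Mantener" at the first element that breaks the consensus.
--     verdict = recomendaciones[0] if recomendaciones[0] in ("Comprar", "Vender") else "Mantener"
--     for r in recomendaciones[1:]:
--         if r != verdict:
--             return "Mantener"
--     return verdict
-- ===== Notes on version B (the rewrite author's own statement) =====
-- stated objective: alternative
-- what changed: Replaces A's two staged short-circuit all(...) scans with a single pass that fixes a consensus candidate from the first element and returns 'Mantener' at the first element breaking it.
import Mathlib
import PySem

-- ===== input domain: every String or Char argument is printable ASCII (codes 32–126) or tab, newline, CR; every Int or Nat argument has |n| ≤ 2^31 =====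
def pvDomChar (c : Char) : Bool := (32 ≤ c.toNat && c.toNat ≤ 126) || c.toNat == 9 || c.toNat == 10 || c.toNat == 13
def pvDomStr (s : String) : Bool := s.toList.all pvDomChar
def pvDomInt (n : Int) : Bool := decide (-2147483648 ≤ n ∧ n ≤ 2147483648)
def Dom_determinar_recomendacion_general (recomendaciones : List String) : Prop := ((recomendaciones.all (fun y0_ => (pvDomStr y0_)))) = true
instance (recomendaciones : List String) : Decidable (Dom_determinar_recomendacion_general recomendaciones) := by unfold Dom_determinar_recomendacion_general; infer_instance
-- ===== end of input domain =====

-- B replaces A's two staged all(...) scans with a single consensus-scan pass (alternative decomposition).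


-- ===== PORT A =====
def determinar_recomendacion_general (recomendaciones : List String) : String :=
  if recomendaciones ≠ [] then
    if recomendaciones.all (fun r => r == "Comprar") then "Comprar"
    else if recomendaciones.all (fun r => r == "Vender") then "Vender"
    else "Mantener"
  else "Sin recomendaciones"

-- ===== PORT B =====
-- single-pass consensus scan: return "Mantener" at the first element that breaks the consensus
def scanConsenso (verdict : String) : List String → String
  | [] => verdict
  | r :: rest => if r ≠ verdict then "Mantener" else scanConsenso verdict rest

def determinar_recomendacion_general_alt (recomendaciones : List String) : String :=
  match recomendaciones with
  | [] => "Sin recomendaciones"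
  | r0 :: rest =>
    let verdict := if r0 = "Comprar" ∨ r0 = "Vender" then r0 else "Mantener"
    scanConsenso verdict rest

-- ===== PRECONDITION & SPEC =====
def Spec_determinar_recomendacion_general (recomendaciones : List String) (out : String) : Prop := out = determinar_recomendacion_general_alt recomendaciones
instance (recomendaciones : List String) (out : String) : Decidable (Spec_determinar_recomendacion_general recomendaciones out) := by unfold Spec_determinar_recomendacion_general; infer_instance

-- ===== CLAIM (what is proved, stated in full; the proofs are below) =====
def Claim_equal_determinar_recomendacion_general : Prop := ∀ (recomendaciones : List String), Dom_determinar_recomendacion_general recomendaciones → Spec_determinar_recomendacion_general recomendaciones (determinar_recomendacion_general recomendaciones)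

-- ===== LEMMAS AND PROOFS =====

-- The consensus scan over the tail equals "all elements equal the verdict, else Mantener".
theorem scanConsenso_eq (v : String) (l : List String) :
    scanConsenso v l = if l.all (fun r => r == v) then v else "Mantener" := by
  induction l with
  | nil => simp [scanConsenso]
  | cons r rest ih =>
    by_cases h : r = v
    · simp [scanConsenso, h, ih]
    · simp [scanConsenso, h]

-- ===== VERDICT (by name: the statement is the Claim_ definition above) =====
theorem determinar_recomendacion_general_spec : Claim_equal_determinar_recomendacion_general := by
  intro l _
  unfold Spec_determinar_recomendacion_general determinar_recomendacion_general
    determinar_recomendacion_general_alt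
  match l with
  | [] => rfl
  | r0 :: rest =>
    simp only [scanConsenso_eq, List.all_cons, ne_eq, reduceCtorEq, not_false_iff, if_true]
    by_cases h0 : r0 = "Comprar"
    · subst h0
      by_cases ha : rest.all (fun r => r == "Comprar") <;> simp [ha]
    · by_cases h1 : r0 = "Vender"
      · subst h1
        by_cases ha : rest.all (fun r => r == "Vender") <;> simp [ha]
      · by_cases ha : rest.all (fun r => r == "Mantener") <;> simp [h0, h1, ha]
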